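-- pv_equiv track=rewrite | github.com/instilled/linkedin-cli | src/linkedin_cli/scraper.py | _time_range_param
-- ===== SOURCE A (Python) =====
-- def _time_range_param(days):
--     """Return the LinkedIn timeRange URL param covering at least *days*."""
--     for threshold, param in [
--         (7, "past_7_days"),
--         (14, "past_14_days"),
--         (28, "past_28_days"),
--         (90, "past_90_days"),
--         (365, "past_365_days"),
--     ]:
--         if days <= threshold:
--             return param
--     return "past_365_days"
-- ===== SOURCE B (Python) =====
-- _THRESHOLDS = [7, 14, 28, 90, 365]
-- _PARAMS = ["past_7_days", "past_14_days", "past_28_days", "past_90_days", "past_365_days"]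
--
--
-- def _time_range_param(days):
--     """Return the LinkedIn timeRange URL param covering at least *days*."""
--     # binary search (bisect_left) for the first threshold >= days, clamped to the last param
--     lo, hi = 0, len(_THRESHOLDS)
--     while lo < hi:
--         mid = (lo + hi) // 2
--         if _THRESHOLDS[mid] < days:
--             lo = mid + 1
--         else:
--             hi = mid
--     return _PARAMS[min(lo, len(_PARAMS) - 1)]
-- ===== Notes on version B (the rewrite author's own statement) =====
-- stated objective: alternative
-- what changed: Replaces the linear scan over (threshold, param) pairs with a hand-written bisect_left binary search over a sorted thresholds list, indexing a parallel params list with the clamped insertion point.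
import Mathlib
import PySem

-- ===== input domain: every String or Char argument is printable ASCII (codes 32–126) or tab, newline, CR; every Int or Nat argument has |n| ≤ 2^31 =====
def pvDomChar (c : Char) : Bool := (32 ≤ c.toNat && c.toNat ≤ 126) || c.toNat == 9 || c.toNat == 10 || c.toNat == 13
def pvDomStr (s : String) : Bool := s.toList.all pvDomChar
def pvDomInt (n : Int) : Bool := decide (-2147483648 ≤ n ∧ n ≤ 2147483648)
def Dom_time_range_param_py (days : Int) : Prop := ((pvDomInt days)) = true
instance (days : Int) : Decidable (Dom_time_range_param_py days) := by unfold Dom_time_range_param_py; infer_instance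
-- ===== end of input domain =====

-- B replaces A's linear first-match scan with a bisect_left binary search over the
-- sorted thresholds plus a clamped lookup in a parallel params list (alternative, not faster).

-- ===== PORT A =====
-- A's for-loop over the literal (threshold, param) list: return param at the first days ≤ threshold
def pvScan (days : Int) : List (Int × String) → String
  | [] => "past_365_days"
  | (threshold, param) :: rest =>
      if days ≤ threshold then param else pvScan days rest

def time_range_param_py (days : Int) : String :=
  pvScan days
    [(7, "past_7_days"), (14, "past_14_days"), (28, "past_28_days"),
     (90, "past_90_days"), (365, "past_365_days")]

-- ===== PORT B =====
def pvThresholds : List Int := [7, 14, 28, 90, 365]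
def pvParams : List String :=
  ["past_7_days", "past_14_days", "past_28_days", "past_90_days", "past_365_days"]

-- B's while-loop: bisect_left over pvThresholds
def pvBisect (days : Int) (lo hi : Nat) : Nat :=
  if lo < hi then
    if pvThresholds.getD ((lo + hi) / 2) 0 < days then
      pvBisect days ((lo + hi) / 2 + 1) hi
    else
      pvBisect days lo ((lo + hi) / 2)
  else lo
termination_by hi - lo
decreasing_by all_goals omega

def time_range_param_py_alt (days : Int) : String :=
  pvParams.getD (min (pvBisect days 0 pvThresholds.length) (pvParams.length - 1)) ""

-- ===== PRECONDITION & SPEC =====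
def Spec_time_range_param_py (days : Int) (out : String) : Prop := out = time_range_param_py_alt days
instance (days : Int) (out : String) : Decidable (Spec_time_range_param_py days out) := by unfold Spec_time_range_param_py; infer_instance

-- ===== CLAIM (what is proved, stated in full; the proofs are below) =====
def Claim_equal_time_range_param_py : Prop := ∀ (days : Int), Dom_time_range_param_py days → Spec_time_range_param_py days (time_range_param_py days)

-- ===== LEMMAS AND PROOFS =====
-- evaluation of B's binary search, one lemma per reachable (lo, hi) state
theorem pvB_done (d : Int) (n : Nat) : pvBisect d n n = n := by rw [pvBisect]; simp

theorem pvB01 (d : Int) : pvBisect d 0 1 = if 7 < d then 1 else 0 := by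
  rw [pvBisect]; simp [pvThresholds, pvB_done]

theorem pvB02 (d : Int) : pvBisect d 0 2 = if 14 < d then 2 else if 7 < d then 1 else 0 := by
  rw [pvBisect]; simp [pvThresholds, pvB_done, pvB01]

theorem pvB34 (d : Int) : pvBisect d 3 4 = if 90 < d then 4 else 3 := by
  rw [pvBisect]; simp [pvThresholds, pvB_done]

theorem pvB35 (d : Int) : pvBisect d 3 5 = if 365 < d then 5 else if 90 < d then 4 else 3 := by
  rw [pvBisect]; simp [pvThresholds, pvB_done, pvB34]

theorem pvBisect_eval (d : Int) :
    pvBisect d 0 5 =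
      if d ≤ 7 then 0 else if d ≤ 14 then 1 else if d ≤ 28 then 2
      else if d ≤ 90 then 3 else if d ≤ 365 then 4 else 5 := by
  rw [pvBisect]
  norm_num [pvThresholds]
  rw [pvB02, pvB35]
  split_ifs <;> first | rfl | omega

-- ===== VERDICT (by name: the statement is the Claim_ definition above) =====
theorem time_range_param_py_spec : Claim_equal_time_range_param_py := by
  intro days _
  show _ = _
  unfold time_range_param_py time_range_param_py_alt
  rw [show pvThresholds.length = 5 from rfl, pvBisect_eval days]
  by_cases h7 : days ≤ 7 <;> by_cases h14 : days ≤ 14 <;> by_cases h28 : days ≤ 28 <;>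
    by_cases h90 : days ≤ 90 <;> by_cases h365 : days ≤ 365 <;>
    simp [pvScan, pvParams, h7, h14, h28, h90, h365]
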